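-- pv_equiv track=rewrite | github.com/whynot-todo/project-deployment | APPRAISAL/app.py | get_max_continus
-- ===== SOURCE A (Python) =====
-- def get_max_continus(tomato_list):
--     _count = 0
--     contu_list = []
--     for _i in tomato_list:
--         if _i.get("is_continuous"):
--             _count += 1
--         else:
--             contu_list.append(_count)
--             _count = 0
--
--     contu_list.append(_count)
--
--     return max(contu_list), contu_list[-1]
-- ===== SOURCE B (Python) =====
-- def _summary(flags):
--     n = len(flags)
--     if n == 0:
--         return (0, 0, 0)
--     if n == 1:
--         return (1, 1, 1) if flags[0] else (0, 0, 0)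
--     mid = n // 2
--     p1, s1, b1 = _summary(flags[:mid])
--     p2, s2, b2 = _summary(flags[mid:])
--     n1, n2 = mid, n - mid
--     pref = p1 if p1 < n1 else n1 + p2
--     suf = s2 if s2 < n2 else n2 + s1
--     best = max(b1, b2, s1 + p2)
--     return (pref, suf, best)
--
--
-- def get_max_continus(tomato_list):
--     flags = [bool(d.get("is_continuous")) for d in tomato_list]
--     pref, suf, best = _summary(flags)
--     return best, suf
-- ===== Notes on version B (the rewrite author's own statement) =====
-- stated objective: alternative
-- what changed: Replaced A's sequential counter loop (collecting run counts into a list and taking max) by a divide-and-conquer segment-summary recursion: each half yields (prefix-run, suffix-run, best-run), merged by boundary arithmetic; the answer is (best, suffix) of the whole list.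
import Mathlib
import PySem

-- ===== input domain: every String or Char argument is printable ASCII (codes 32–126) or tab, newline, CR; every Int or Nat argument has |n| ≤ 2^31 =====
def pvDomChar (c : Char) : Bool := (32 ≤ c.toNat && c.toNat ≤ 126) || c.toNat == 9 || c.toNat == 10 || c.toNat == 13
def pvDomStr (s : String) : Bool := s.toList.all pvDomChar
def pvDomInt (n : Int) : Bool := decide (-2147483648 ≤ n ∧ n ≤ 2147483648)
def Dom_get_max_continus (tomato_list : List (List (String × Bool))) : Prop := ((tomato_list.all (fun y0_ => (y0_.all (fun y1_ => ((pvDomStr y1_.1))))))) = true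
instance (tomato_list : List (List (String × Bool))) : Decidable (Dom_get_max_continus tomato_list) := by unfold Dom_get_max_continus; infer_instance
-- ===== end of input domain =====

-- B replaces A's sequential counter loop by a divide-and-conquer segment-summary recursion
-- (alternative decomposition; same O(n) cost). A is total, so no Pre_ is needed.

-- shared helper: truthiness of _i.get("is_continuous") on the association-list dict (first match, missing key = falsy None)
def isContinuous (d : List (String × Bool)) : Bool :=
  ((d.find? (fun kv => kv.1 == "is_continuous")).map (·.2)).getD false

-- ===== PORT A =====
-- literal transliteration: the for-loop is a foldl over the state (_count, contu_list);
-- contu_list always ends nonempty (the final append), so the .getD 0 defaults of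
-- max?/pyGet? are never taken — they only make the total functions well-typed.
def get_max_continus (tomato_list : List (List (String × Bool))) : Int × Int :=
  let st := tomato_list.foldl
    (fun (st : Int × List Int) i =>
      if isContinuous i then (st.1 + 1, st.2) else (0, st.2 ++ [st.1]))
    (0, [])
  let contu := st.2 ++ [st.1]
  ((PySem.List.max? contu (fun x => x)).getD 0,
   (PySem.List.pyGet? contu (-1)).getD 0)

-- ===== PORT B =====
-- transliteration of Source B's _summary: split at n//2, recurse on the two slices,
-- merge the (pref, suf, best) summaries by boundary arithmetic
def summary (l : List Bool) : Int × Int × Int :=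
  match l with
  | [] => (0, 0, 0)
  | [b] => if b then (1, 1, 1) else (0, 0, 0)
  | a :: b :: rest =>
      let n := (a :: b :: rest).length
      let mid := n / 2
      let s1 := summary ((a :: b :: rest).take mid)
      let s2 := summary ((a :: b :: rest).drop mid)
      let n1 : Int := mid
      let n2 : Int := (n : Int) - mid
      let pref := if s1.1 < n1 then s1.1 else n1 + s2.1
      let suf := if s2.2.1 < n2 then s2.2.1 else n2 + s1.2.1
      let best := max (max s1.2.2 s2.2.2) (s1.2.1 + s2.1)
      (pref, suf, best)
termination_by l.length
decreasing_by
  · simp; omega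
  · simp; omega

def get_max_continus_alt (tomato_list : List (List (String × Bool))) : Int × Int :=
  let flags := tomato_list.map isContinuous
  let s := summary flags
  (s.2.2, s.2.1)

-- ===== PRECONDITION & SPEC =====
def Spec_get_max_continus (tomato_list : List (List (String × Bool))) (out : Int × Int) : Prop := out = get_max_continus_alt tomato_list
instance (tomato_list : List (List (String × Bool))) (out : Int × Int) : Decidable (Spec_get_max_continus tomato_list out) := by unfold Spec_get_max_continus; infer_instance

-- ===== CLAIM (what is proved, stated in full; the proofs are below) =====
def Claim_equal_get_max_continus : Prop := ∀ (tomato_list : List (List (String × Bool))), Dom_get_max_continus tomato_list → Spec_get_max_continus tomato_list (get_max_continus tomato_list)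

-- ===== LEMMAS AND PROOFS =====

-- spec helpers: fA = trailing run (A's final _count), genA = the counts A appends,
-- gA = A's running max, prefRun/maxRun = leading run / best run of a Bool list
def fA : List Bool → Int → Int
  | [], c => c
  | b :: bs, c => if b then fA bs (c + 1) else fA bs 0

def genA : List Bool → Int → List Int
  | [], _ => []
  | b :: bs, c => if b then genA bs (c + 1) else c :: genA bs 0

def gA : List Bool → Int → Int → Int
  | [], c, m => max m c
  | b :: bs, c, m => if b then gA bs (c + 1) m else gA bs 0 (max m c)

def prefRun : List Bool → Int
  | [] => 0
  | b :: bs => if b then prefRun bs + 1 else 0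

def maxRun : List Bool → Int
  | [] => 0
  | b :: bs => if b then max (prefRun bs + 1) (maxRun bs) else maxRun bs

theorem foldA_char (bs : List Bool) : ∀ (c : Int) (L : List Int),
    bs.foldl (fun (st : Int × List Int) b =>
      if b then (st.1 + 1, st.2) else (0, st.2 ++ [st.1])) (c, L)
      = (fA bs c, L ++ genA bs c) := by
  induction bs with
  | nil => intro c L; simp [fA, genA]
  | cons b bs ih =>
      intro c L
      by_cases hb : b = true <;> simp [hb, fA, genA, ih, List.append_assoc]

theorem foldMax_char (bs : List Bool) : ∀ (c m : Int),
    (genA bs c ++ [fA bs c]).foldl max m = gA bs c m := by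
  induction bs with
  | nil => intro c m; simp [genA, fA, gA]
  | cons b bs ih =>
      intro c m
      by_cases hb : b = true <;> simp [hb, genA, fA, gA, ih]

theorem fA_nonneg (bs : List Bool) : ∀ c : Int, 0 ≤ c → 0 ≤ fA bs c := by
  induction bs with
  | nil => intro c hc; simpa [fA] using hc
  | cons b bs ih =>
      intro c hc
      by_cases hb : b = true <;> simp [hb, fA]
      · exact ih _ (by omega)
      · exact ih 0 le_rfl

theorem genA_nonneg (bs : List Bool) : ∀ (c x : Int), 0 ≤ c → x ∈ genA bs c → 0 ≤ x := by
  induction bs with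
  | nil => intro c x _ hx; simp [genA] at hx
  | cons b bs ih =>
      intro c x hc hx
      by_cases hb : b = true <;> simp [hb, genA] at hx
      · exact ih _ _ (by omega) hx
      · rcases hx with h | h
        · omega
        · exact ih 0 x le_rfl h

theorem maxGetD (l : List Int) (hne : l ≠ []) (hnn : ∀ x ∈ l, 0 ≤ x) :
    (PySem.List.max? l (fun x => x)).getD 0 = l.foldl max 0 := by
  cases l with
  | nil => exact absurd rfl hne
  | cons a t =>
      rw [PySem.List.max?_id_cons]
      have ha : (0 : Int) ≤ a := hnn a (by simp)
      simp [List.foldl_cons, max_eq_right ha]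

theorem pref_nonneg (l : List Bool) : 0 ≤ prefRun l := by
  induction l with
  | nil => simp [prefRun]
  | cons b bs ih => by_cases hb : b = true <;> simp [prefRun, hb] <;> omega

theorem pref_le_len (l : List Bool) : prefRun l ≤ l.length := by
  induction l with
  | nil => simp [prefRun]
  | cons b bs ih => by_cases hb : b = true <;> simp [prefRun, hb] <;> omega

theorem pref_le_maxRun (l : List Bool) : prefRun l ≤ maxRun l := by
  induction l with
  | nil => simp [prefRun, maxRun]
  | cons b bs ih =>
      have := pref_nonneg bs
      by_cases hb : b = true <;> simp [prefRun, maxRun, hb] <;> omega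

theorem maxRun_nonneg (l : List Bool) : 0 ≤ maxRun l := by
  induction l with
  | nil => simp [maxRun]
  | cons b bs ih =>
      by_cases hb : b = true <;> simp [maxRun, hb] <;> omega

theorem maxRun_le_len (l : List Bool) : maxRun l ≤ l.length := by
  induction l with
  | nil => simp [maxRun]
  | cons b bs ih =>
      have := pref_le_len bs
      by_cases hb : b = true <;> simp [maxRun, hb] <;> omega

theorem fA_le_len (l : List Bool) : ∀ c : Int, 0 ≤ c → fA l c ≤ c + l.length := by
  induction l with
  | nil => intro c _; simp [fA]
  | cons b bs ih =>
      intro c hc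
      by_cases hb : b = true <;> simp [fA, hb]
      · have := ih (c + 1) (by omega); push_cast; omega
      · have := ih 0 le_rfl; push_cast at *; omega

theorem fA0_le_len (l : List Bool) : fA l 0 ≤ l.length := by
  simpa using fA_le_len l 0 le_rfl

-- fA l c depends on c only when l is all-true (fA l 0 = |l|)
theorem fA_shift (l : List Bool) : ∀ c : Int,
    fA l c = if fA l 0 = l.length then (l.length : Int) + c else fA l 0 := by
  induction l with
  | nil => intro c; simp [fA]
  | cons b bs ih =>
      intro c
      have hle := fA0_le_len bs
      by_cases hb : b = true <;> simp [fA, hb]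
      · rw [ih (c + 1), ih 1]
        by_cases h : fA bs 0 = (bs.length : Int) <;> simp [h] <;> push_cast <;> omega
      · have hne : fA bs 0 ≠ ((bs.length : Int) + 1) := by omega
        simp [hne]

theorem pref_eq_len_iff (l : List Bool) :
    prefRun l = l.length ↔ fA l 0 = l.length := by
  induction l with
  | nil => simp [prefRun, fA]
  | cons b bs ih =>
      have h1 := pref_le_len bs
      have h2 := fA0_le_len bs
      by_cases hb : b = true <;> simp [prefRun, fA, hb]
      · rw [fA_shift bs 1]
        by_cases h : fA bs 0 = (bs.length : Int) <;> simp [h] <;> push_cast <;> omega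
      · constructor <;> intro h <;> [skip; skip] <;> push_cast at * <;> omega

theorem pref_append (l1 l2 : List Bool) :
    prefRun (l1 ++ l2) =
      if prefRun l1 < l1.length then prefRun l1 else (l1.length : Int) + prefRun l2 := by
  induction l1 with
  | nil => simp [prefRun]
  | cons b bs ih =>
      have h1 := pref_le_len bs
      have h0 := pref_nonneg bs
      by_cases hb : b = true <;>
        simp [prefRun, hb, ih] <;>
        split_ifs <;> push_cast at * <;> omega

theorem fA_append (l1 l2 : List Bool) : ∀ c : Int,
    fA (l1 ++ l2) c =
      if fA l2 0 = l2.length then (l2.length : Int) + fA l1 c else fA l2 0 := by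
  induction l1 with
  | nil => intro c; simpa [fA] using fA_shift l2 c
  | cons b bs ih =>
      intro c
      by_cases hb : b = true <;> simp [fA, hb, ih]

theorem maxRun_append (l1 l2 : List Bool) :
    maxRun (l1 ++ l2) = max (max (maxRun l1) (maxRun l2)) (fA l1 0 + prefRun l2) := by
  induction l1 with
  | nil =>
      have := pref_le_maxRun l2
      have := maxRun_nonneg l2
      simp [maxRun, fA]; omega
  | cons b bs ih =>
      by_cases hb : b = true <;> simp [maxRun, fA, hb, ih]
      rw [pref_append, fA_shift bs 1]
      have h1 := pref_le_len bs
      have h0 := pref_nonneg bs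
      have h2 := fA0_le_len bs
      have h3 := fA_nonneg bs 0 le_rfl
      have h4 := pref_nonneg l2
      have h5 := maxRun_le_len bs
      have h6 := pref_eq_len_iff bs
      by_cases h : prefRun bs < (bs.length : Int)
      · have hne : fA bs 0 ≠ (bs.length : Int) := by
          intro hh; have := h6.mpr hh; omega
        rw [if_pos h, if_neg hne]
      · have heq : prefRun bs = (bs.length : Int) := by omega
        have hfa : fA bs 0 = (bs.length : Int) := h6.mp heq
        rw [if_neg h, if_pos hfa]; omega

-- A's running max in terms of prefRun/maxRun
theorem gA_char (l : List Bool) : ∀ (c m : Int), 0 ≤ c →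
    gA l c m = max m (max (c + prefRun l) (maxRun l)) := by
  induction l with
  | nil => intro c m hc; simp [gA, prefRun, maxRun]; omega
  | cons b bs ih =>
      intro c m hc
      have h1 := pref_le_maxRun bs
      have h0 := pref_nonneg bs
      by_cases hb : b = true <;> simp [gA, prefRun, maxRun, hb]
      · rw [ih (c + 1) m (by omega)]; omega
      · rw [ih 0 (max m c) le_rfl]; omega

-- the D&C summary computes (leading run, trailing run, best run)
theorem summary_spec : ∀ (n : Nat) (l : List Bool), l.length = n →
    summary l = (prefRun l, fA l 0, maxRun l) := by
  intro n
  induction n using Nat.strong_induction_on with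
  | _ n ih =>
    intro l hl
    match l with
    | [] => simp [summary, prefRun, fA, maxRun]
    | [b] =>
        by_cases hb : b = true <;> simp [summary, prefRun, fA, maxRun, hb]
    | a :: b :: rest =>
        rw [summary]
        have hlen : (a :: b :: rest).length = n := hl
        have hn2 : 2 ≤ n := by simp at hlen; omega
        set L := a :: b :: rest with hL
        have hmidlt : L.length / 2 < n := by omega
        have hmid1 : 1 ≤ L.length / 2 := by rw [hlen]; omega
        have htake : (L.take (L.length / 2)).length = L.length / 2 := by
          simp; omega
        have hdrop : (L.drop (L.length / 2)).length = L.length - L.length / 2 := by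
          simp
        have ht := ih (L.length / 2) (by omega) (L.take (L.length / 2)) htake
        have hd := ih (L.length - L.length / 2) (by omega) (L.drop (L.length / 2)) hdrop
        simp only [ht, hd]
        have hsplit : L.take (L.length / 2) ++ L.drop (L.length / 2) = L :=
          List.take_append_drop _ _
        set t := L.take (L.length / 2) with hT
        set d := L.drop (L.length / 2) with hD
        have hcast : ((L.length : Int) - (L.length / 2 : Nat)) = (d.length : Int) := by
          rw [hdrop]; push_cast [Nat.cast_sub (Nat.div_le_self _ _)]; ring
        have hp : prefRun L =
            if prefRun t < ((L.length / 2 : Nat) : Int) then prefRun t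
            else ((L.length / 2 : Nat) : Int) + prefRun d := by
          have := pref_append t d
          rw [hsplit, htake] at this
          exact this
        have hs : fA L 0 =
            if fA d 0 = (d.length : Int) then (d.length : Int) + fA t 0 else fA d 0 := by
          have := fA_append t d 0
          rw [hsplit] at this
          exact this
        have hm : maxRun L = max (max (maxRun t) (maxRun d)) (fA t 0 + prefRun d) := by
          have := maxRun_append t d
          rw [hsplit] at this
          exact this
        refine Prod.ext ?_ (Prod.ext ?_ ?_)
        · show (if prefRun t < ((L.length / 2 : Nat) : Int) then prefRun t
              else ((L.length / 2 : Nat) : Int) + prefRun d) = prefRun L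
          rw [hp]
        · show (if fA d 0 < ((L.length : Int) - (L.length / 2 : Nat)) then fA d 0
              else ((L.length : Int) - (L.length / 2 : Nat)) + fA t 0) = fA L 0
          rw [hs, hcast]
          have := fA0_le_len d
          by_cases h : fA d 0 = (d.length : Int)
          · rw [if_pos h, if_neg (by omega)]
          · rw [if_neg h, if_pos (by omega)]
        · show max (max (maxRun t) (maxRun d)) (fA t 0 + prefRun d) = maxRun L
          rw [hm]

-- ===== VERDICT (by name: the statement is the Claim_ definition above) =====
theorem get_max_continus_spec : Claim_equal_get_max_continus := by
  intro tl _
  unfold Spec_get_max_continus get_max_continus get_max_continus_alt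
  have hfold : tl.foldl
      (fun (st : Int × List Int) i =>
        if isContinuous i then (st.1 + 1, st.2) else (0, st.2 ++ [st.1])) (0, [])
      = (fA (tl.map isContinuous) 0, [] ++ genA (tl.map isContinuous) 0) := by
    rw [← foldA_char, List.foldl_map]
  rw [hfold]
  set bs := tl.map isContinuous with hbs
  simp only [List.nil_append]
  have hmax : (PySem.List.max? (genA bs 0 ++ [fA bs 0]) (fun x => x)).getD 0 = gA bs 0 0 := by
    rw [maxGetD _ (by simp) ?_, foldMax_char]
    intro x hx
    rcases List.mem_append.mp hx with h | h
    · exact genA_nonneg bs 0 x le_rfl h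
    · simp at h; subst h; exact fA_nonneg bs 0 le_rfl
  have hlast : (PySem.List.pyGet? (genA bs 0 ++ [fA bs 0]) (-1)).getD 0 = fA bs 0 := by
    rw [PySem.List.pyGet?_neg_one_append_singleton]; rfl
  rw [hmax, hlast, summary_spec bs.length bs rfl]
  have h1 := pref_le_maxRun bs
  have h2 := maxRun_nonneg bs
  have h3 := pref_nonneg bs
  rw [gA_char bs 0 0 le_rfl]
  have h4 : max 0 (max (0 + prefRun bs) (maxRun bs)) = maxRun bs := by omega
  rw [h4]
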